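-- pv_equiv track=rewrite | github.com/se0hyun/ssafy_algorithm | algorithm/04_string/3143_가장 빠른 문자열 타이핑/sol.py | fast_typing
-- ===== SOURCE A (Python) =====
-- def fast_typing(origin, shortcut):
--     originLength = len(origin)  # 원본 문자열 길이
--     shortcutLength = len(shortcut)  # 단축어 길이
--     result = 0
--     i = 0
--
--     while i < originLength:
--         try:
--             if origin[i:i+shortcutLength] == shortcut:
--                 result += 1
--                 i += shortcutLength
--             else:
--                 result += 1
--                 i += 1
--         except IndexError:
--             result += originLength - i
--     return result
-- ===== SOURCE B (Python) =====
-- def fast_typing(origin, shortcut):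
--     originLength = len(origin)
--     shortcutLength = len(shortcut)
--     result = 0
--     i = 0
--     while True:
--         j = origin.find(shortcut, i)
--         if j == -1:
--             return result + (originLength - i)
--         result += (j - i) + 1
--         i = j + shortcutLength
-- ===== Notes on version B (the rewrite author's own statement) =====
-- stated objective: faster
-- what changed: Instead of comparing a fresh length-m slice against the shortcut at every index, B greedily jumps from one shortcut occurrence to the next with str.find, adding the skipped characters in one arithmetic step.
-- outside the precondition, e.g. on fast_typing('', ''): A returns 0, B does not finish within the time limit
import Mathlib
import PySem

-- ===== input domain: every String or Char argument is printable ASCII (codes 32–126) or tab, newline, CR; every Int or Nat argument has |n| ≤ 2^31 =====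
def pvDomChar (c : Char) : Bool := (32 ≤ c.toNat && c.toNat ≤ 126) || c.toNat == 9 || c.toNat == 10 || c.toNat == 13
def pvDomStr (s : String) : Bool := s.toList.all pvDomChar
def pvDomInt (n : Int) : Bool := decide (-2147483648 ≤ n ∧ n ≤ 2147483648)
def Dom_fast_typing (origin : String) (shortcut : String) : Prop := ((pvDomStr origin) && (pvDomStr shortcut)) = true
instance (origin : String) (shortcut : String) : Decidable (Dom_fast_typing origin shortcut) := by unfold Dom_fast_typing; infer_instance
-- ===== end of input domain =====

-- B replaces A's per-index slice comparison by a greedy str.find scan that jumps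
-- from one shortcut occurrence to the next (objective: faster, measured).

-- ===== PORT A =====
-- A's while loop, ported with fuel: with a nonempty shortcut every iteration
-- advances i by at least 1, so fuel = len(origin)+1 never runs out on inputs
-- admitted by Pre_ (empty shortcut makes the Python loop run forever).
-- The try/except IndexError is dead code: Python slicing never raises IndexError.
def pvGoA (o s : List Char) : Nat → Nat → Int → Int
  | 0, _, r => r
  | f + 1, i, r =>
    if i < o.length then
      -- origin[i:i+shortcutLength] == shortcut
      if PySem.List.slice o (some (i : Int)) (some ((i : Int) + (s.length : Int))) = s then
        pvGoA o s f (i + s.length) (r + 1)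
      else
        pvGoA o s f (i + 1) (r + 1)
    else r

def fast_typing (origin : String) (shortcut : String) : Int :=
  pvGoA origin.toList shortcut.toList (origin.toList.length + 1) 0 0

-- ===== PORT B =====
-- B's while-True loop, ported with the same fuel bound: each iteration either
-- returns or advances i past a found occurrence (by ≥ 1 when the shortcut is
-- nonempty).  origin.find(shortcut, i) is PySem.Chars.findFrom.
def pvGoB (o s : List Char) : Nat → Nat → Int → Int
  | 0, _, r => r
  | f + 1, i, r =>
    let j := PySem.Chars.findFrom o s (i : Int) none
    if j = -1 then r + ((o.length : Int) - (i : Int))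
    else pvGoB o s f (j.toNat + s.length) (r + (j - (i : Int)) + 1)

def fast_typing_alt (origin : String) (shortcut : String) : Int :=
  pvGoB origin.toList shortcut.toList (origin.toList.length + 1) 0 0

-- ===== PRECONDITION & SPEC =====
-- Pre_ excludes only the empty shortcut: there A loops forever (i += 0) on every
-- nonempty origin, and B's find-loop also never terminates (A returns only at
-- origin = "", where it gives 0 while B diverges).
def Pre_fast_typing (origin : String) (shortcut : String) : Prop := shortcut ≠ ""
instance (origin : String) (shortcut : String) : Decidable (Pre_fast_typing origin shortcut) := by
  unfold Pre_fast_typing; infer_instance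

def pvWitness_fast_typing : String × String := ("abcabcaabc", "abc")

def Spec_fast_typing (origin : String) (shortcut : String) (out : Int) : Prop := out = fast_typing_alt origin shortcut
instance (origin : String) (shortcut : String) (out : Int) : Decidable (Spec_fast_typing origin shortcut out) := by unfold Spec_fast_typing; infer_instance

-- ===== CLAIM (what is proved, stated in full; the proofs are below) =====
def Claim_equal_fast_typing : Prop := ∀ (origin : String) (shortcut : String), Dom_fast_typing origin shortcut → Pre_fast_typing origin shortcut → Spec_fast_typing origin shortcut (fast_typing origin shortcut)

-- ===== LEMMAS AND PROOFS =====

-- A's slice comparison succeeds exactly when the shortcut is a prefix of o.drop i.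
theorem pv_match_iff_prefix (o s : List Char) (i : Nat) :
    ((o.drop i).take s.length = s) ↔ s <+: o.drop i := by
  rw [List.prefix_iff_eq_take]
  exact ⟨fun h => h.symm, fun h => h.symm⟩

theorem pv_prefix_len (o s : List Char) (hs : s ≠ []) (j : Nat) (h : s <+: o.drop j) :
    j + s.length ≤ o.length := by
  have h1 := h.length_le
  have h2 : 1 ≤ s.length := List.length_pos_iff.mpr hs
  simp [List.length_drop] at h1
  omega

-- a first match ≥ k is unique
theorem pv_first_unique (o s : List Char) (k a b : Nat)
    (ha : k ≤ a) (hb : k ≤ b)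
    (pa : s <+: o.drop a) (pb : s <+: o.drop b)
    (ma : ∀ t, k ≤ t → t < a → ¬ s <+: o.drop t)
    (mb : ∀ t, k ≤ t → t < b → ¬ s <+: o.drop t) : a = b := by
  rcases lt_trichotomy a b with h | h | h
  · exact absurd pa (mb a ha h)
  · exact h
  · exact absurd pb (ma b hb h)

theorem pv_infix_drop_iff (o s : List Char) (k : Nat) :
    s <:+: o.drop k ↔ ∃ j, k ≤ j ∧ s <+: o.drop j := by
  constructor
  · intro h
    have h1 : PySem.Chars.isIn s (o.drop k) = true := (PySem.Chars.isIn_iff_infix _ _).mpr h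
    obtain ⟨j, hj⟩ := (PySem.Chars.exists_prefix_drop_iff_isIn _ _).mpr h1
    refine ⟨k + j, by omega, ?_⟩
    rwa [List.drop_drop] at hj
  · rintro ⟨j, hkj, hj⟩
    apply (PySem.Chars.isIn_iff_infix _ _).mp
    apply (PySem.Chars.exists_prefix_drop_iff_isIn _ _).mp
    refine ⟨j - k, ?_⟩
    rwa [List.drop_drop, Nat.add_sub_cancel' hkj]

theorem pv_findFrom_at (o s : List Char) (i : Nat) (hi : i ≤ o.length)
    (hp : s <+: o.drop i) : PySem.Chars.findFrom o s (i : Int) none = (i : Int) := by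
  have hne : PySem.Chars.findFrom o s (i : Int) none ≠ -1 := by
    intro h
    rw [PySem.Chars.findFrom_natCast_eq_neg_one_iff o s i hi] at h
    exact h ((pv_infix_drop_iff o s i).mpr ⟨i, le_refl i, hp⟩)
  obtain ⟨h1, h2, h3⟩ := PySem.Chars.findFrom_natCast_spec o s i hi hne
  have hto : (PySem.Chars.findFrom o s (i : Int) none).toNat = i := by
    by_contra hne2
    have : i < (PySem.Chars.findFrom o s (i : Int) none).toNat := by omega
    exact h3 i (le_refl i) this hp
  omega

theorem pv_findFrom_none (o s : List Char) (hs : s ≠ []) :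
    PySem.Chars.findFrom o s (o.length : Int) none = -1 := by
  rw [PySem.Chars.findFrom_natCast_eq_neg_one_iff o s o.length (le_refl _)]
  simp only [List.drop_length]
  intro h
  exact hs (List.eq_nil_of_infix_nil h)

-- when there is no match at i, the first match from i is the first match from i+1
theorem pv_findFrom_shift (o s : List Char) (i : Nat) (hi : i < o.length)
    (hp : ¬ s <+: o.drop i) :
    PySem.Chars.findFrom o s (i : Int) none = PySem.Chars.findFrom o s ((i + 1 : Nat) : Int) none := by
  have hi1 : i + 1 ≤ o.length := hi
  have hi0 : i ≤ o.length := by omega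
  by_cases h : PySem.Chars.findFrom o s ((i + 1 : Nat) : Int) none = -1
  · rw [h]
    rw [PySem.Chars.findFrom_natCast_eq_neg_one_iff o s i hi0]
    intro hinf
    obtain ⟨j, hkj, hj⟩ := (pv_infix_drop_iff o s i).mp hinf
    have hj1 : i + 1 ≤ j := by
      rcases Nat.eq_or_lt_of_le hkj with h' | h'
      · exact absurd (h' ▸ hj) hp
      · omega
    rw [PySem.Chars.findFrom_natCast_eq_neg_one_iff o s (i+1) hi1] at h
    exact h ((pv_infix_drop_iff o s (i+1)).mpr ⟨j, hj1, hj⟩)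
  · obtain ⟨h1, h2, h3⟩ := PySem.Chars.findFrom_natCast_spec o s (i+1) hi1 h
    set f := PySem.Chars.findFrom o s ((i + 1 : Nat) : Int) none with hf
    have hne : PySem.Chars.findFrom o s (i : Int) none ≠ -1 := by
      intro hm1
      rw [PySem.Chars.findFrom_natCast_eq_neg_one_iff o s i hi0] at hm1
      exact hm1 ((pv_infix_drop_iff o s i).mpr ⟨f.toNat, by omega, h2⟩)
    obtain ⟨g1, g2, g3⟩ := PySem.Chars.findFrom_natCast_spec o s i hi0 hne
    set g := PySem.Chars.findFrom o s (i : Int) none with hg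
    have hgi : i ≠ g.toNat := by
      intro heq
      exact hp (heq ▸ g2)
    have : g.toNat = f.toNat := by
      apply pv_first_unique o s (i+1) g.toNat f.toNat ?_ (by omega) g2 h2 ?_ h3
      · omega
      · intro t ht1 ht2
        exact g3 t (by omega) ht2
    omega

theorem pv_goB_stable (o s : List Char) (hs : s ≠ []) :
    ∀ f1 f2 i r, i ≤ o.length → o.length - i < f1 → o.length - i < f2 →
      pvGoB o s f1 i r = pvGoB o s f2 i r := by
  intro f1
  induction f1 with
  | zero => intro f2 i r _ h1 _; omega
  | succ f1 ih =>
    intro f2 i r hi h1 h2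
    obtain ⟨f2', rfl⟩ : ∃ f2', f2 = f2' + 1 := ⟨f2 - 1, by omega⟩
    simp only [pvGoB]
    by_cases hj : PySem.Chars.findFrom o s (i : Int) none = -1
    · simp [hj]
    · simp only [hj, if_false]
      obtain ⟨h1', h2', _⟩ := PySem.Chars.findFrom_natCast_spec o s i hi hj
      set j := PySem.Chars.findFrom o s (i : Int) none with hjdef
      have hlen : j.toNat + s.length ≤ o.length := pv_prefix_len o s hs j.toNat h2'
      have hm : 1 ≤ s.length := List.length_pos_iff.mpr hs
      exact ih f2' (j.toNat + s.length) _ (by omega) (by omega) (by omega)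

theorem pv_main (o s : List Char) (hs : s ≠ []) :
    ∀ f i r, i ≤ o.length → o.length - i < f →
      pvGoA o s f i r = pvGoB o s f i r := by
  intro f
  induction f with
  | zero => intro i r _ h; omega
  | succ f ih =>
    intro i r hi hf
    have hm : 1 ≤ s.length := List.length_pos_iff.mpr hs
    by_cases hin : i < o.length
    · simp only [pvGoA, if_pos hin, PySem.List.slice_natCast_add]
      by_cases hmatch : (o.drop i).take s.length = s
      · simp only [if_pos hmatch]
        have hp : s <+: o.drop i := (pv_match_iff_prefix o s i).mp hmatch
        have hlen : i + s.length ≤ o.length := pv_prefix_len o s hs i hp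
        rw [ih (i + s.length) (r + 1) (by omega) (by omega)]
        -- B's step: findFrom returns i itself
        have hfind := pv_findFrom_at o s i (by omega) hp
        simp only [pvGoB, hfind]
        have hne : (i : Int) ≠ -1 := by omega
        simp only [if_neg hne, Int.toNat_natCast]
        congr 1
        ring
      · simp only [if_neg hmatch]
        have hp : ¬ s <+: o.drop i := fun h => hmatch ((pv_match_iff_prefix o s i).mpr h)
        rw [ih (i + 1) (r + 1) (by omega) (by omega)]
        have hshift := pv_findFrom_shift o s i hin hp
        obtain ⟨f', rfl⟩ : ∃ f', f = f' + 1 := ⟨f - 1, by omega⟩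
        show pvGoB o s (f' + 1) (i + 1) (r + 1) = pvGoB o s (f' + 1 + 1) i r
        conv_lhs => rw [pvGoB]
        conv_rhs => rw [pvGoB]
        rw [hshift]
        by_cases hj : PySem.Chars.findFrom o s ((i + 1 : Nat) : Int) none = -1
        · simp only [hj, if_pos]
          push_cast
          ring
        · obtain ⟨h1, h2, _⟩ := PySem.Chars.findFrom_natCast_spec o s (i+1) hin hj
          have hlen : (PySem.Chars.findFrom o s ((i + 1 : Nat) : Int) none).toNat + s.length ≤ o.length :=
            pv_prefix_len o s hs _ h2
          simp only [if_neg hj]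
          have hacc : r + 1 + (PySem.Chars.findFrom o s ((i + 1 : Nat) : Int) none - ((i + 1 : Nat) : Int)) + 1
              = r + (PySem.Chars.findFrom o s ((i + 1 : Nat) : Int) none - (i : Int)) + 1 := by
            push_cast; ring
          rw [hacc]
          exact pv_goB_stable o s hs f' (f' + 1) _ _ hlen (by omega) (by omega)
    · have hieq : i = o.length := by omega
      subst hieq
      simp only [pvGoA, if_neg hin, pvGoB, pv_findFrom_none o s hs, if_true, sub_self, add_zero]

-- ===== VERDICT (by name: the statement is the Claim_ definition above) =====
theorem fast_typing_spec : Claim_equal_fast_typing := by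
  intro origin shortcut _ hpre
  unfold Spec_fast_typing fast_typing fast_typing_alt
  have hs : shortcut.toList ≠ [] := by
    intro h
    exact hpre (by simpa [String.toList_eq_nil_iff] using h)
  exact pv_main origin.toList shortcut.toList hs (origin.toList.length + 1) 0 0 (by omega) (by omega)
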